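-- pv_equiv track=rewrite | github.com/K1XE/LeetCode | 周赛/456/no1 copy.py | minXor
-- ===== SOURCE A (Python) =====
-- from typing import List, Optional, Tuple
--
-- def minXor(nums: List[int], k: int) -> int:
--     n = len(nums)
--     px = [0] * (n + 1)
--     for i in range(n):
--         px[i + 1] = px[i] ^ nums[i]
--     def cost(i: int, j: int) -> int:
--         return px[j] ^ px[i]
--     INF = 10**18
--     dp = [[INF] * (n + 1) for _ in range(k + 1)]
--     for j in range(1, n + 1):
--         dp[1][j] = cost(0, j)
--     for m in range(2, k + 1):
--         for j in range(m, n + 1):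
--             best = INF
--             for i in range(m - 1, j):
--                 val = max(dp[m - 1][i], cost(i, j))
--                 if val < best:
--                     best = val
--             dp[m][j] = best
--     return dp[k][n]
-- ===== SOURCE B (Python) =====
-- from functools import lru_cache
-- from typing import List
--
-- def minXor(nums: List[int], k: int) -> int:
--     INF = 10**18
--     n = len(nums)
--     if k < 1 or k > n:
--         return INF
--     px = [0]
--     for x in nums:
--         px.append(px[-1] ^ x)
--
--     @lru_cache(maxsize=None)
--     def f(m: int, j: int) -> int:
--         # minimal possible max-segment-XOR of splitting nums[:j] into m parts
--         if m == 1: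
--             return px[j]
--         best = INF
--         for i in range(m - 1, j):
--             v = f(m - 1, i)
--             c = px[j] ^ px[i]
--             w = v if v > c else c
--             if w < best:
--                 best = w
--         return best
--
--     return f(k, n)
-- ===== Notes on version B (the rewrite author's own statement) =====
-- stated objective: alternative
-- what changed: A fills a bottom-up (k+1)x(n+1) DP table with three nested loops and reads dp[k][n]; B answers infeasible inputs (k<1 or k>n) up front with the 10**18 sentinel and otherwise evaluates the same prefix-XOR recurrence as a top-down memoized recursion f(m,j), computing only the states reachable from (k,n).
import Mathlib
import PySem

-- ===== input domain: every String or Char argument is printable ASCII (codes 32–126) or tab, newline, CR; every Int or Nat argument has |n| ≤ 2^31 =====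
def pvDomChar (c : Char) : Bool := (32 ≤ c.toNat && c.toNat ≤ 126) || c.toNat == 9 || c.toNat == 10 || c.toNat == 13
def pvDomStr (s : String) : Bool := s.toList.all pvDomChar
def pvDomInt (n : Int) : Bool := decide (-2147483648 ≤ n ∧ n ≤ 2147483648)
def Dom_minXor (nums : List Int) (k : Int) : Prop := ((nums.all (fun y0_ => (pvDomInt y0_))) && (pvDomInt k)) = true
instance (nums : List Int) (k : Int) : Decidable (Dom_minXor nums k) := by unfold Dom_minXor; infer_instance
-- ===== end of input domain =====

-- B replaces A's bottom-up (k+1)×(n+1) DP table by a top-down memoized recursion on the same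
-- prefix-XOR recurrence, with the infeasible cases (k < 1 or k > n) answered up front.

def pvINF : Int := 10 ^ 18

-- ===== PORT A =====
-- A's helper cost(i, j) = px[j] ^ px[i]
def pvCost (px : List Int) (i j : Nat) : Int := PySem.Int.bxor (px.getD j 0) (px.getD i 0)

-- 'for i in range(n): px[i+1] = px[i] ^ nums[i]' on px = [0]*(n+1)
def aPx (nums : List Int) : List Int :=
  (List.range nums.length).foldl
    (fun px i => px.set (i + 1) (PySem.Int.bxor (px.getD i 0) (nums.getD i 0)))
    (List.replicate (nums.length + 1) (0 : Int))

-- the innermost 'best' loop of A (indices in range on every admitted input)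
def aBest (px : List Int) (dp : List (List Int)) (m j : Int) : Int :=
  (PySem.List.pyRange (m - 1) j 1).foldl
    (fun best i =>
      let val := max ((dp.getD (m - 1).toNat []).getD i.toNat 0) (pvCost px i.toNat j.toNat)
      if val < best then val else best) pvINF

-- 'for j in range(1, n+1): dp[1][j] = cost(0, j)'
def aRow1 (px : List Int) (n : Nat) (dp : List (List Int)) : List (List Int) :=
  (PySem.List.pyRange 1 ((n : Int) + 1) 1).foldl
    (fun dp j => dp.set 1 ((dp.getD 1 []).set j.toNat (pvCost px 0 j.toNat))) dp

-- 'for m in range(2, k+1): for j in range(m, n+1): … dp[m][j] = best'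
def aRows (px : List Int) (n : Nat) (k : Int) (dp : List (List Int)) : List (List Int) :=
  (PySem.List.pyRange 2 (k + 1) 1).foldl
    (fun dp m =>
      (PySem.List.pyRange m ((n : Int) + 1) 1).foldl
        (fun dp j => dp.set m.toNat ((dp.getD m.toNat []).set j.toNat (aBest px dp m j))) dp) dp

def minXor (nums : List Int) (k : Int) : Int :=
  let n := nums.length
  let px := aPx nums
  let dp := List.replicate (k + 1).toNat (List.replicate (n + 1) pvINF)
  let dp := aRow1 px n dp
  let dp := aRows px n k dp
  (dp.getD k.toNat []).getD n pvINF

-- ===== PORT B =====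
-- 'px = [0]; for x in nums: px.append(px[-1] ^ x)'
def bPx (nums : List Int) : List Int :=
  nums.foldl (fun px x => px ++ [PySem.Int.bxor (px.getLast?.getD 0) x]) [(0 : Int)]

-- Source B's memoized helper f(m, j); the cache does not change any value, so it is ported as the
-- plain recursion (structural on m).  Source B never calls f with m = 0; that case is filled with pvINF.
def altF (px : List Int) : Nat → Nat → Int
  | 0, _ => pvINF
  | 1, j => px.getD j 0
  | m + 2, j =>
    (List.range' (m + 1) (j - (m + 1))).foldl
      (fun best i =>
        let v := altF px (m + 1) i
        let c := PySem.Int.bxor (px.getD j 0) (px.getD i 0)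
        let w := if v > c then v else c
        if w < best then w else best) pvINF

def minXor_alt (nums : List Int) (k : Int) : Int :=
  if k < 1 ∨ (nums.length : Int) < k then pvINF
  else altF (bPx nums) k.toNat nums.length

-- ===== PRECONDITION & SPEC =====
-- Pre_ excludes exactly the inputs on which A raises IndexError: k < 0 (dp[k] on a short table),
-- and k = 0 with a nonempty list (the 'dp[1][j] = …' loop indexes the missing row 1).
def Pre_minXor (nums : List Int) (k : Int) : Prop := 1 ≤ k ∨ (k = 0 ∧ nums = [])
instance (nums : List Int) (k : Int) : Decidable (Pre_minXor nums k) := by unfold Pre_minXor; infer_instance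
def pvWitness_minXor : List Int × Int := ([3, 1, 2], 2)

def Spec_minXor (nums : List Int) (k : Int) (out : Int) : Prop := out = minXor_alt nums k
instance (nums : List Int) (k : Int) (out : Int) : Decidable (Spec_minXor nums k out) := by unfold Spec_minXor; infer_instance

-- ===== CLAIM (what is proved, stated in full; the proofs are below) =====
def Claim_equal_minXor : Prop := ∀ (nums : List Int) (k : Int), Dom_minXor nums k → Pre_minXor nums k → Spec_minXor nums k (minXor nums k)

-- ===== LEMMAS AND PROOFS =====

def pxs : List Int → Int → List Int
  | [], a => [a]
  | x :: xs, a => a :: pxs xs (PySem.Int.bxor a x)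

theorem bPx_aux (xs : List Int) : ∀ (s : List Int) (a : Int),
    xs.foldl (fun px x => px ++ [PySem.Int.bxor (px.getLast?.getD 0) x]) (s ++ [a]) = s ++ pxs xs a := by
  induction xs with
  | nil => intro s a; simp [pxs]
  | cons x xs ih =>
    intro s a
    have h1 : (s ++ [a]).getLast?.getD 0 = a := by simp
    simp only [List.foldl_cons, h1]
    rw [show (s ++ [a] ++ [PySem.Int.bxor a x]) = (s ++ [a]) ++ [PySem.Int.bxor a x] from rfl,
      ih (s ++ [a]) (PySem.Int.bxor a x)]
    simp [pxs]

theorem pxs_bPx (nums : List Int) : bPx nums = pxs nums 0 := by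
  have := bPx_aux nums [] 0
  simpa [bPx] using this

theorem pxs_length (l : List Int) : ∀ a, (pxs l a).length = l.length + 1 := by
  induction l with
  | nil => intro a; simp [pxs]
  | cons x xs ih => intro a; simp [pxs, ih]

theorem pxs_getD_len (l : List Int) : ∀ a d, (pxs l a).getD l.length d = l.foldl (fun b y => PySem.Int.bxor b y) a := by
  induction l with
  | nil => intro a d; simp [pxs]
  | cons x xs ih =>
    intro a d
    show (a :: pxs xs (PySem.Int.bxor a x)).getD (xs.length + 1) d = _
    rw [List.getD_cons_succ, ih]
    rfl

theorem pxs_concat (l : List Int) : ∀ a x, pxs (l ++ [x]) a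
    = pxs l a ++ [PySem.Int.bxor (l.foldl (fun b y => PySem.Int.bxor b y) a) x] := by
  induction l with
  | nil => intro a x; simp [pxs]
  | cons y ys ih => intro a x; simp [pxs, ih]

theorem set_concat (v w : Int) : ∀ (s t : List Int), (s ++ w :: t).set s.length v = s ++ v :: t := by
  intro s t
  induction s with
  | nil => simp
  | cons y ys ih => simp [ih]

theorem aPx_aux (nums : List Int) : ∀ i, i ≤ nums.length →
    (List.range i).foldl
      (fun px i => px.set (i + 1) (PySem.Int.bxor (px.getD i 0) (nums.getD i 0)))
      (List.replicate (nums.length + 1) (0 : Int))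
    = pxs (nums.take i) 0 ++ List.replicate (nums.length - i) 0 := by
  intro i
  induction i with
  | zero => intro _; simp [pxs, List.replicate_succ]
  | succ i ih =>
    intro hle
    have hi : i < nums.length := by omega
    rw [List.range_succ, List.foldl_append, ih (by omega)]
    have hlen : (pxs (nums.take i) 0).length = i + 1 := by
      rw [pxs_length, List.length_take_of_le (by omega)]
    simp only [List.foldl_cons, List.foldl_nil]
    have hrep : List.replicate (nums.length - i) (0 : Int) = 0 :: List.replicate (nums.length - (i+1)) 0 := by
      rw [show nums.length - i = (nums.length - (i+1)) + 1 by omega, List.replicate_succ]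
    rw [hrep]
    have hgd := pxs_getD_len (nums.take i) 0 0
    rw [List.length_take_of_le (by omega)] at hgd
    have hgetD : (pxs (nums.take i) 0 ++ 0 :: List.replicate (nums.length - (i+1)) 0).getD i 0
        = (nums.take i).foldl (fun b y => PySem.Int.bxor b y) 0 := by
      rw [List.getD_append _ _ _ _ (by omega)]; exact hgd
    have htoList : nums[i]?.toList = [nums.getD i 0] := by
      simp [List.getElem?_eq_getElem hi]
    rw [hgetD]
    have hsc := set_concat (PySem.Int.bxor ((nums.take i).foldl (fun b y => PySem.Int.bxor b y) 0) (nums.getD i 0)) 0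
      (pxs (nums.take i) 0) (List.replicate (nums.length - (i+1)) 0)
    rw [hlen] at hsc
    rw [hsc, List.take_add_one, htoList, pxs_concat]
    simp

theorem pxs_aPx (nums : List Int) : aPx nums = pxs nums 0 := by
  have := aPx_aux nums nums.length le_rfl
  simpa [aPx] using this

def W (px : List Int) : Nat → Nat → Int
  | 0, _ => pvINF
  | 1, j => if j = 0 then pvINF else PySem.Int.bxor (px.getD j 0) (px.getD 0 0)
  | m + 2, j =>
    (List.range' (m + 1) (j - (m + 1))).foldl
      (fun best i =>
        let val := max (W px (m + 1) i) (PySem.Int.bxor (px.getD j 0) (px.getD i 0))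
        if val < best then val else best) pvINF

theorem W_lt (px : List Int) (m j : Nat) (h : j < m) : W px m j = pvINF := by
  match m with
  | 0 => rfl
  | 1 => have : j = 0 := by omega
         simp [W, this]
  | m + 2 =>
    have : j - (m + 1) = 0 := by omega
    simp [W, this]

theorem pxs_getD_zero (nums : List Int) : (pxs nums 0).getD 0 0 = 0 := by
  cases nums <;> simp [pxs]

theorem altF_eq_W (px : List Int) (hpx : px.getD 0 0 = 0) : ∀ (m j : Nat),
    1 ≤ m → (m = 1 → 1 ≤ j) → altF px m j = W px m j := by
  intro m
  induction m with
  | zero => intro j h; omega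
  | succ m ih =>
    intro j _ h1
    match m with
    | 0 =>
      have hj : 1 ≤ j := h1 rfl
      have hj0 : ¬ (j = 0) := by omega
      simp only [altF, W, if_neg hj0]
      rw [hpx, PySem.Int.bxor_zero]
    | m + 1 =>
      show altF px (m + 2) j = W px (m + 2) j
      simp only [altF, W]
      apply PySem.List.foldl_congr_mem
      intro best i hi
      have him : m + 1 ≤ i := (List.mem_range'_1.mp hi).1
      have hrec : altF px (m + 1) i = W px (m + 1) i := by
        apply ih i (by omega)
        intro h; omega
      simp only [hrec]
      have hmax : (if W px (m + 1) i > PySem.Int.bxor (px.getD j 0) (px.getD i 0)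
          then W px (m + 1) i else PySem.Int.bxor (px.getD j 0) (px.getD i 0))
          = max (W px (m + 1) i) (PySem.Int.bxor (px.getD j 0) (px.getD i 0)) := by
        split_ifs with h
        · exact (max_eq_left (by omega)).symm
        · exact (max_eq_right (by omega)).symm
      rw [hmax]

def Etab (px : List Int) (M r j : Nat) : Int := if r ≤ M then W px r j else pvINF

def tbl (px : List Int) (kN n M : Nat) : List (List Int) :=
  (List.range (kN + 1)).map (fun r => (List.range (n + 1)).map (Etab px M r))

def Qtab (px : List Int) (M J r j : Nat) : Int :=
  if r = M + 1 then (if j < J then W px (M + 1) j else pvINF) else Etab px M r j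

def tblQ (px : List Int) (kN n M J : Nat) : List (List Int) :=
  (List.range (kN + 1)).map (fun r => (List.range (n + 1)).map (Qtab px M J r))

theorem getD_map_range {α : Type} (f : Nat → α) (L i : Nat) (d : α) (h : i < L) :
    ((List.range L).map f).getD i d = f i := by
  rw [List.getD_eq_getElem?_getD, List.getElem?_map, List.getElem?_range h]
  rfl

theorem set_map_range {α : Type} (f : Nat → α) (L i : Nat) (v : α) (h : i < L) :
    ((List.range L).map f).set i v = (List.range L).map (fun j => if j = i then v else f j) := by
  apply List.ext_getElem
  · simp
  · intro j h1 h2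
    simp only [List.getElem_set, List.getElem_map, List.getElem_range]
    simp only [List.length_set, List.length_map, List.length_range] at h1
    split_ifs with ha hb hc
    · rfl
    · omega
    · omega
    · rfl

theorem map_range_congr {α : Type} (f g : Nat → α) (L : Nat) (h : ∀ j, j < L → f j = g j) :
    (List.range L).map f = (List.range L).map g :=
  List.map_congr_left (fun j hj => h j (List.mem_range.mp hj))

theorem pyRange_natCast (a b : Nat) (h : a ≤ b) :
    PySem.List.pyRange (a : Int) (b : Int) 1 = (List.range' a (b - a)).map (fun i : Nat => (i : Int)) := by
  rw [PySem.List.pyRange_one, List.range'_eq_map_range, List.map_map]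
  have : ((b : Int) - (a : Int)).toNat = b - a := by omega
  rw [this]
  apply map_range_congr
  intro j hj
  simp only [Function.comp_apply]
  push_cast
  ring

theorem tbl_init (px : List Int) (kN n : Nat) :
    List.replicate (kN + 1) (List.replicate (n + 1) pvINF) = tbl px kN n 0 := by
  apply List.ext_getElem
  · simp [tbl]
  · intro r h1 h2
    simp only [List.length_replicate] at h1
    simp only [tbl, List.getElem_replicate, List.getElem_map, List.getElem_range]
    apply List.ext_getElem
    · simp
    · intro j hh1 hh2
      simp only [List.length_replicate] at hh1
      simp only [List.getElem_replicate, List.getElem_map, List.getElem_range, Etab]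
      match r with
      | 0 => simp [W]
      | r + 1 => split_ifs with h
                 · omega
                 · rfl

theorem tblQ_base (px : List Int) (kN n M : Nat) : tbl px kN n M = tblQ px kN n M (M + 1) := by
  apply map_range_congr
  intro r hr
  apply map_range_congr
  intro j hj
  simp only [Qtab, Etab]
  by_cases h1 : r = M + 1
  · subst h1
    rw [if_pos rfl, if_neg (show ¬ M + 1 ≤ M by omega)]
    split_ifs with h2
    · exact (W_lt px (M + 1) j h2).symm
    · rfl
  · rw [if_neg h1]

theorem tblQ_full (px : List Int) (kN n M : Nat) : tblQ px kN n M (n + 1) = tbl px kN n (M + 1) := by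
  apply map_range_congr
  intro r hr
  apply map_range_congr
  intro j hj
  simp only [Qtab, Etab]
  by_cases h1 : r = M + 1
  · subst h1
    rw [if_pos rfl, if_pos (show j < n + 1 by omega), if_pos (le_refl (M + 1))]
  · rw [if_neg h1]
    split_ifs with h2 h3
    · rfl
    · omega
    · omega
    · rfl

theorem tbl_succ_of_gt (px : List Int) (kN n M : Nat) (h : n < M + 1) :
    tbl px kN n M = tbl px kN n (M + 1) := by
  apply map_range_congr
  intro r hr
  apply map_range_congr
  intro j hj
  simp only [Etab]
  by_cases h1 : r = M + 1
  · subst h1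
    rw [if_neg (show ¬ M + 1 ≤ M by omega), if_pos (le_refl (M + 1))]
    exact (W_lt px (M + 1) j (by omega)).symm
  · split_ifs with h2 h3
    · rfl
    · omega
    · omega
    · rfl

theorem row1_fill (px : List Int) (kN n : Nat) (hk : 1 ≤ kN) :
    ∀ J, 1 ≤ J → J ≤ n + 1 →
    (PySem.List.pyRange 1 ((J : Nat) : Int) 1).foldl
      (fun dp j => dp.set 1 ((dp.getD 1 []).set j.toNat (pvCost px 0 j.toNat)))
      (tbl px kN n 0)
    = tblQ px kN n 0 J := by
  intro J hJ1
  induction J, hJ1 using Nat.le_induction with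
  | base =>
    intro _
    rw [show ((1 : Nat) : Int) = 1 by norm_num, PySem.List.pyRange_one_eq_nil le_rfl]
    exact tblQ_base px kN n 0
  | succ J hJ ih =>
    intro hJ2
    rw [show ((J + 1 : Nat) : Int) = (J : Int) + 1 by push_cast; ring,
      PySem.List.pyRange_one_succ_right (by omega : (1 : Int) ≤ (J : Int)),
      List.foldl_append, ih (by omega), List.foldl_cons, List.foldl_nil, Int.toNat_natCast]
    rw [tblQ, getD_map_range _ _ 1 _ (by omega), set_map_range _ _ J _ (by omega),
      set_map_range _ _ 1 _ (by omega)]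
    apply map_range_congr
    intro r hr
    by_cases h1 : r = 1
    · subst h1
      rw [if_pos rfl]
      apply map_range_congr
      intro j hj
      simp only [Qtab, Etab, if_true]
      by_cases hjJ : j = J
      · subst hjJ
        rw [if_pos rfl, if_pos (show j < j + 1 by omega)]
        show pvCost px 0 j = W px 1 j
        simp only [W, pvCost]
        rw [if_neg (show ¬ j = 0 by omega)]
      · rw [if_neg hjJ]
        split_ifs with h2 h3
        · rfl
        · omega
        · omega
        · rfl
    · rw [if_neg h1]
      apply map_range_congr
      intro j hj
      simp only [Qtab]
      rw [if_neg (by omega : ¬ r = 0 + 1), if_neg (by omega : ¬ r = 0 + 1)]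

theorem aBest_eval (px : List Int) (kN n M : Nat) (hM : 1 ≤ M) (hMk : M ≤ kN) :
    ∀ (J0 J : Nat), M + 1 ≤ J → J ≤ n →
    aBest px (tblQ px kN n M J0) ((M : Int) + 1) ((J : Nat) : Int) = W px (M + 1) J := by
  intro J0 J hJ1 hJ2
  unfold aBest
  rw [show ((M : Int) + 1 - 1) = ((M : Nat) : Int) by ring, Int.toNat_natCast,
    pyRange_natCast M J (by omega), List.foldl_map]
  rw [show M + 1 = (M - 1) + 2 by omega]
  simp only [W]
  rw [show M - 1 + 1 = M by omega]
  apply PySem.List.foldl_congr_mem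
  intro best i hi
  have him := List.mem_range'_1.mp hi
  have hiM : M ≤ i := him.1
  have hiJ : i < J := by omega
  simp only [Int.toNat_natCast]
  rw [tblQ, getD_map_range _ _ M _ (by omega), getD_map_range _ _ i _ (by omega)]
  simp only [Qtab, Etab]
  rw [if_neg (show ¬ M = M + 1 by omega), if_pos (le_refl M)]
  rfl

theorem rowm_fill (px : List Int) (kN n M : Nat) (hM : 1 ≤ M) (hMk : M + 1 ≤ kN) :
    ∀ J, M + 1 ≤ J → J ≤ n + 1 →
    (PySem.List.pyRange ((M : Int) + 1) ((J : Nat) : Int) 1).foldl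
      (fun dp j => dp.set ((M : Int) + 1).toNat
        ((dp.getD ((M : Int) + 1).toNat []).set j.toNat (aBest px dp ((M : Int) + 1) j)))
      (tbl px kN n M)
    = tblQ px kN n M J := by
  intro J hJ1
  induction J, hJ1 using Nat.le_induction with
  | base =>
    intro _
    rw [show ((M + 1 : Nat) : Int) = (M : Int) + 1 by push_cast; ring,
      PySem.List.pyRange_one_eq_nil le_rfl]
    exact tblQ_base px kN n M
  | succ J hJ ih =>
    intro hJ2
    rw [show ((J + 1 : Nat) : Int) = (J : Int) + 1 by push_cast; ring,
      PySem.List.pyRange_one_succ_right (by omega : (M : Int) + 1 ≤ (J : Int)),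
      List.foldl_append, ih (by omega), List.foldl_cons, List.foldl_nil]
    rw [aBest_eval px kN n M hM (by omega) J J (by omega) (by omega),
      show ((M : Int) + 1).toNat = M + 1 by omega, Int.toNat_natCast]
    rw [tblQ, getD_map_range _ _ (M + 1) _ (by omega), set_map_range _ _ J _ (by omega),
      set_map_range _ _ (M + 1) _ (by omega)]
    apply map_range_congr
    intro r hr
    by_cases h1 : r = M + 1
    · subst h1
      rw [if_pos rfl]
      apply map_range_congr
      intro j hj
      simp only [Qtab, if_true]
      by_cases hjJ : j = J
      · subst hjJ
        rw [if_pos rfl, if_pos (show j < j + 1 by omega)]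
      · rw [if_neg hjJ]
        split_ifs with h2 h3
        · rfl
        · omega
        · omega
        · rfl
    · rw [if_neg h1]
      apply map_range_congr
      intro j hj
      simp only [Qtab]
      rw [if_neg h1, if_neg h1]

theorem rows_fill (px : List Int) (kN n : Nat) (hk : 1 ≤ kN) :
    ∀ M, 1 ≤ M → M ≤ kN →
    (PySem.List.pyRange 2 ((M : Int) + 1) 1).foldl
      (fun dp m =>
        (PySem.List.pyRange m ((n : Int) + 1) 1).foldl
          (fun dp j => dp.set m.toNat ((dp.getD m.toNat []).set j.toNat (aBest px dp m j))) dp)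
      (tbl px kN n 1)
    = tbl px kN n M := by
  intro M hM1
  induction M, hM1 using Nat.le_induction with
  | base =>
    intro _
    rw [show ((1 : Nat) : Int) + 1 = 2 by norm_num, PySem.List.pyRange_one_eq_nil le_rfl]
    rfl
  | succ M hM ih =>
    intro hMk
    rw [show ((M + 1 : Nat) : Int) + 1 = ((M : Int) + 1) + 1 by push_cast; ring,
      PySem.List.pyRange_one_succ_right (by omega : (2 : Int) ≤ (M : Int) + 1),
      List.foldl_append, ih (by omega), List.foldl_cons, List.foldl_nil]
    by_cases hcmp : M ≤ n
    · rw [show ((n : Int) + 1) = ((n + 1 : Nat) : Int) by push_cast; ring,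
        rowm_fill px kN n M hM hMk (n + 1) (by omega) (by omega), tblQ_full]
    · rw [PySem.List.pyRange_one_eq_nil (by omega : (n : Int) + 1 ≤ (M : Int) + 1)]
      exact tbl_succ_of_gt px kN n M (by omega)

theorem minXor_eq_W (nums : List Int) (k : Int) (hk : 1 ≤ k) :
    minXor nums k = W (pxs nums 0) k.toNat nums.length := by
  show ((aRows (aPx nums) nums.length k
      (aRow1 (aPx nums) nums.length
        (List.replicate (k + 1).toNat (List.replicate (nums.length + 1) pvINF)))).getD k.toNat []).getD
      nums.length pvINF = _
  rw [pxs_aPx, show (k + 1).toNat = k.toNat + 1 by omega,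
    tbl_init (pxs nums 0) k.toNat nums.length]
  have hk1 : 1 ≤ k.toNat := by omega
  unfold aRow1
  rw [show ((nums.length : Int) + 1) = ((nums.length + 1 : Nat) : Int) by push_cast; ring,
    row1_fill (pxs nums 0) k.toNat nums.length hk1 (nums.length + 1) (by omega) (by omega)]
  rw [show tblQ (pxs nums 0) k.toNat nums.length 0 (nums.length + 1)
      = tbl (pxs nums 0) k.toNat nums.length 1 from tblQ_full _ _ _ 0]
  unfold aRows
  rw [show (k + 1 : Int) = ((k.toNat : Int) + 1) by omega,
    rows_fill (pxs nums 0) k.toNat nums.length hk1 k.toNat hk1 le_rfl]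
  rw [tbl, getD_map_range _ _ k.toNat _ (by omega), getD_map_range _ _ nums.length _ (by omega),
    Etab, if_pos le_rfl]

-- ===== VERDICT (by name: the statement is the Claim_ definition above) =====
theorem minXor_spec : Claim_equal_minXor := by
  intro nums k _ hpre
  unfold Spec_minXor
  rcases hpre with hk | ⟨hk0, hnil⟩
  · rw [minXor_eq_W nums k hk]
    unfold minXor_alt
    by_cases hbig : k < 1 ∨ (nums.length : Int) < k
    · rw [if_pos hbig]
      exact W_lt (pxs nums 0) k.toNat nums.length (by omega)
    · rw [if_neg hbig, pxs_bPx]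
      rw [not_or] at hbig
      obtain ⟨hb1, hb2⟩ := hbig
      exact (altF_eq_W (pxs nums 0) (pxs_getD_zero nums) k.toNat nums.length (by omega)
        (by intro h1; omega)).symm
  · subst hk0; subst hnil
    decide
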